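-- pv_equiv track=rewrite | github.com/stone1098/algorithm | pg_12978.py | solution
-- ===== SOURCE A (Python) =====
-- def dfs(road, num, time):
--
--     # 방문한 애들을 저장할 임시 테이블
--     temp = []
--
--     for r in road:
--         if r[0] == num:
--             temp.append(r[1])
--             if time[r[1]] == 0:
--                 time[r[1]] = time[num] + r[2]
--             else:
--                 if time[r[1]] > time[num] + r[2]:
--                     time[r[1]] = time[num] + r[2]
--
--     for t in temp:
--         dfs(road, t, time)
--
-- def solution(N, road, K):
--     answer = 0
--
--     for r in road:
--         if r[0] > r[1]: r[0], r[1] = r[1], r[0]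
--
--     # 1부터 시간이 얼마나 걸리는 지 작성
--     time = [0] * (N+1)
--
--     dfs(road, 1, time)
--
--     for i in range(1, len(time)):
--         if time[i] <= K: answer+=1
--
--     return answer
-- ===== SOURCE B (Python) =====
-- def solution(N, road, K):
--     # One forward relaxation pass over the nodes in increasing order (a topological
--     # order of the low->high normalized edges); times kept in a dict, node 1 at 0.
--     # Unreached villages count as time 0, as in A (the original problem is connected).
--     dist = {1: 0}
--     for u in range(1, N + 1):
--         if u not in dist:
--             continue
--         for r in road:
--             a, b = (r[0], r[1]) if r[0] <= r[1] else (r[1], r[0])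
--             if a == u:
--                 nd = dist[u] + r[2]
--                 if b not in dist or nd < dist[b]:
--                     dist[b] = nd
--     return sum(1 for i in range(1, N + 1) if dist.get(i, 0) <= K)
-- ===== Notes on version B (the rewrite author's own statement) =====
-- stated objective: alternative
-- what changed: Replaces A's recursive DFS that re-explores every path from node 1 (relaxing along each) by a single forward relaxation pass over the nodes in increasing order, which is a topological order of the low-to-high normalized edges, with times kept in a dict.
-- outside the precondition, e.g. on solution(2, [[1, 2, 3], [1, 2, 0], [1, 2, 2]], 1): A returns 1, B returns 2; on solution(2, [[1, 2, -1]], 0): A returns 2, B returns 2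
import Mathlib
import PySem

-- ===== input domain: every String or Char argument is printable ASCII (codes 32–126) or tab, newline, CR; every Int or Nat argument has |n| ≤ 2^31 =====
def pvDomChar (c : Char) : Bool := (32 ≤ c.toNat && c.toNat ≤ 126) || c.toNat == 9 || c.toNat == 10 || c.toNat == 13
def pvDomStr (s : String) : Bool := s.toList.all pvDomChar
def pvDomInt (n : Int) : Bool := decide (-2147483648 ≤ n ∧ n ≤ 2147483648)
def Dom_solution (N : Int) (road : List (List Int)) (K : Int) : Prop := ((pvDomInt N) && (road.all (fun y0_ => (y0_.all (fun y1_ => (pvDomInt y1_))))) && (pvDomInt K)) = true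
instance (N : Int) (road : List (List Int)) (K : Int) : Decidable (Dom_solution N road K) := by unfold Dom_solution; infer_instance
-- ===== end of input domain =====

-- B replaces A's recursive DFS, which re-explores every path from node 1 and relaxes
-- along each, by a single forward relaxation pass over the nodes in increasing order (a
-- topological order of the low→high normalized edges), with times kept in a dict.
-- A mutates `road` in place (normalizing each edge), B does not — the equivalence proved
-- here is about the return value only.

-- ===== PORT A =====
-- xs[i] read (defaulting where Python would raise; Pre_ keeps all reads in range)
def pvIdx (t : List Int) (i : Int) : Int := (PySem.List.pyGet? t i).getD 0
-- xs[i] = v write (no-op where Python would raise; Pre_ keeps all writes in range)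
def pvSet (t : List Int) (i : Int) (v : Int) : List Int := PySem.List.pySetD t i v

def dfsA (road : List (List Int)) : Nat → Int → List Int → List Int
  | 0, _, time => time
  | fuel+1, num, time =>
    let p := road.foldl (fun (acc : List Int × List Int) r =>
      if pvIdx r 0 = num then
        (acc.1 ++ [pvIdx r 1],
         let nv := pvIdx acc.2 num + pvIdx r 2
         if pvIdx acc.2 (pvIdx r 1) = 0 then pvSet acc.2 (pvIdx r 1) nv
         else if pvIdx acc.2 (pvIdx r 1) > nv then pvSet acc.2 (pvIdx r 1) nv
         else acc.2)
      else acc) ([], time)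
    p.1.foldl (fun time t => dfsA road fuel t time) p.2

def solution (N : Int) (road : List (List Int)) (K : Int) : Int :=
  let road2 := road.map (fun r => match r with
    | a :: b :: rest => if a > b then b :: a :: rest else a :: b :: rest
    | r => r)
  let time0 : List Int := List.replicate (N+1).toNat 0
  let time := dfsA road2 (N.toNat + 2) 1 time0
  (PySem.List.pyRange 1 (PySem.List.len time) 1).foldl
    (fun a i => if pvIdx time i ≤ K then a + 1 else a) 0

-- ===== PORT B =====
def solution_alt (N : Int) (road : List (List Int)) (K : Int) : Int :=
  let dist0 : PySem.Dict Int Int := PySem.Dict.insert PySem.Dict.empty 1 0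
  let dist := (PySem.List.pyRange 1 (N+1) 1).foldl (fun dist u =>
    if PySem.Dict.contains dist u = false then dist
    else road.foldl (fun dist r =>
      let ab := if pvIdx r 0 ≤ pvIdx r 1 then (pvIdx r 0, pvIdx r 1)
                else (pvIdx r 1, pvIdx r 0)
      if ab.1 = u then
        let nd := (PySem.Dict.get? dist u).getD 0 + pvIdx r 2
        match PySem.Dict.get? dist ab.2 with
        | none => PySem.Dict.insert dist ab.2 nd
        | some db => if nd < db then PySem.Dict.insert dist ab.2 nd else dist
      else dist) dist) dist0
  (PySem.List.pyRange 1 (N+1) 1).foldl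
    (fun acc i => if (PySem.Dict.get? dist i).getD 0 ≤ K then acc + 1 else acc) 0

-- ===== PRECONDITION & SPEC =====
-- Pre_ admits (a) the problem's natural domain — N ≥ 1 villages and each road a triple
-- with distinct endpoints in 1..N and positive travel time — and (b) all instances on
-- which A's DFS is inert: every row has at least two entries and its smaller endpoint is
-- not node 1, so nothing is reachable from node 1 and A returns immediately.  Outside
-- Pre_, A raises (short rows, out-of-range writes reachable from node 1, self-loop
-- infinite recursion), or A returns a value that is an accident of its 0-means-unvisited
-- sentinel (rows with non-positive weight reachable from node 1): see cites.
def Pre_solution (N : Int) (road : List (List Int)) (K : Int) : Prop :=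
  (1 ≤ N ∧ ∀ r ∈ road, 3 ≤ r.length ∧
    1 ≤ pvIdx r 0 ∧ pvIdx r 0 ≤ N ∧ 1 ≤ pvIdx r 1 ∧ pvIdx r 1 ≤ N ∧
    pvIdx r 0 ≠ pvIdx r 1 ∧ 1 ≤ pvIdx r 2) ∨
  (∀ r ∈ road, 2 ≤ r.length ∧
    (if pvIdx r 0 > pvIdx r 1 then pvIdx r 1 else pvIdx r 0) ≠ 1)
instance (N : Int) (road : List (List Int)) (K : Int) : Decidable (Pre_solution N road K) := by
  unfold Pre_solution; infer_instance

def pvWitness_solution : Int × List (List Int) × Int := (3, ([[1, 2, 3], [2, 3, 2], [3, 1, 4]], 5))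

def Spec_solution (N : Int) (road : List (List Int)) (K : Int) (out : Int) : Prop := out = solution_alt N road K
instance (N : Int) (road : List (List Int)) (K : Int) (out : Int) : Decidable (Spec_solution N road K out) := by unfold Spec_solution; infer_instance

-- ===== CLAIM (what is proved, stated in full; the proofs are below) =====
def Claim_equal_solution : Prop := ∀ (N : Int) (road : List (List Int)) (K : Int), Dom_solution N road K → Pre_solution N road K → Spec_solution N road K (solution N road K)

-- ===== LEMMAS AND PROOFS =====

-- B's normalization of one row, as a function (the lambda inside solution_alt).
def edgeOf (r : List Int) : Int × Int × Int :=
  if pvIdx r 0 ≤ pvIdx r 1 then (pvIdx r 0, pvIdx r 1, pvIdx r 2)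
  else (pvIdx r 1, pvIdx r 0, pvIdx r 2)

-- Shape of the normalized edge list under Pre_: strictly low→high, endpoints in 1..N, weight ≥ 1.
def HE (N : Int) (E : List (Int × Int × Int)) : Prop :=
  ∀ e ∈ E, 1 ≤ e.1 ∧ e.1 < e.2.1 ∧ e.2.1 ≤ N ∧ 1 ≤ e.2.2

-- running minimum with `none` = not yet reached
def omin : Option Int → Int → Option Int
  | none, x => some x
  | some y, x => some (min y x)

def ominList (acc : Option Int) (l : List Int) : Option Int := l.foldl omin acc

-- candidate values d(a) + c over edges (a, v, c) with a < u, using the table `prev`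
def candVec (E : List (Int × Int × Int)) (prev : List (Option Int)) (v : Int) : List Int :=
  E.filterMap (fun e => if e.2.1 = v ∧ 0 < e.1 ∧ e.1 < v then
      (prev.getD e.1.toNat none).map (fun d => d + e.2.2) else none)

-- table of shortest distances from node 1 for nodes 0, …, v-1 (edges only go low→high)
def deltaVec (E : List (Int × Int × Int)) : Nat → List (Option Int)
  | 0 => []
  | v+1 => let prev := deltaVec E v
           prev ++ [if v = 1 then some 0 else ominList none (candVec E prev (v : Int))]

-- shortest distance from node 1 to v over E (none = unreachable)
def delta (E : List (Int × Int × Int)) (v : Int) : Option Int :=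
  if v < 0 then none else (deltaVec E (v.toNat+1)).getD v.toNat none

-- candidate values d(a) + c over edges (a, v, c) ∈ E with 0 < a < u
def cand (E : List (Int × Int × Int)) (u v : Int) : List Int :=
  E.filterMap (fun e => if e.2.1 = v ∧ 0 < e.1 ∧ e.1 < u then
      (delta E e.1).map (fun d => d + e.2.2) else none)

-- ---- basic table lemmas ----
lemma deltaVec_length (E : List (Int × Int × Int)) : ∀ v, (deltaVec E v).length = v := by
  intro v; induction v with
  | zero => rfl
  | succ v ih => simp [deltaVec, ih]

lemma deltaVec_getD_mono (E : List (Int × Int × Int)) :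
    ∀ w v k, k < v → v ≤ w → (deltaVec E w).getD k none = (deltaVec E v).getD k none := by
  intro w
  induction w with
  | zero => intro v k h1 h2; omega
  | succ w ih =>
    intro v k h1 h2
    rcases eq_or_lt_of_le h2 with rfl | h
    · rfl
    · have hvw : v ≤ w := by omega
      have hk : k < (deltaVec E w).length := by rw [deltaVec_length]; omega
      simp only [deltaVec]
      rw [List.getD_append _ _ _ _ hk]
      exact ih v k h1 hvw

lemma delta_eq_vec (E : List (Int × Int × Int)) (v : Int) (w : Nat)
    (h0 : 0 ≤ v) (hw : v.toNat < w) : delta E v = (deltaVec E w).getD v.toNat none := by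
  rw [delta, if_neg (by omega)]
  exact (deltaVec_getD_mono E w (v.toNat+1) v.toNat (by omega) (by omega)).symm

lemma delta_one (E : List (Int × Int × Int)) : delta E 1 = some 0 := by
  rw [delta, if_neg (by omega)]
  simp [deltaVec, List.getD_append_right, deltaVec_length]

lemma delta_lt_one (E : List (Int × Int × Int)) (v : Int) (h : v < 1) : delta E v = none := by
  rcases lt_or_ge v 0 with h0 | h0
  · rw [delta, if_pos h0]
  · have hv0 : v = 0 := by omega
    subst hv0
    rw [delta, if_neg (by omega)]
    simp only [Int.toNat_zero, deltaVec, List.nil_append]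
    have hc : candVec E ([] : List (Option Int)) 0 = [] := by
      refine List.filterMap_eq_nil_iff.mpr (fun e he => ?_)
      rw [if_neg]; rintro ⟨h1, h2, h3⟩; omega
    simp [hc, ominList]

lemma delta_unfold (E : List (Int × Int × Int)) (v : Int) (hv : 2 ≤ v) :
    delta E v = ominList none (cand E v v) := by
  rw [delta, if_neg (by omega)]
  have hlen : (deltaVec E v.toNat).length = v.toNat := deltaVec_length E _
  simp only [deltaVec]
  rw [List.getD_append_right _ _ _ _ (by omega)]
  rw [hlen, Nat.sub_self]
  have hne : v.toNat ≠ 1 := by omega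
  simp only [List.getD_cons_zero, if_neg hne]
  congr 1
  refine List.filterMap_congr (fun e he => ?_)
  have hcast : ((v.toNat : Int)) = v := Int.toNat_of_nonneg (by omega)
  rw [hcast]
  by_cases hcond : e.2.1 = v ∧ 0 < e.1 ∧ e.1 < v
  · rw [if_pos hcond, if_pos hcond]
    congr 1
    exact (delta_eq_vec E e.1 v.toNat (by omega) (by omega)).symm
  · rw [if_neg hcond, if_neg hcond]

-- ---- ominList lemmas ----
lemma ominList_append (acc : Option Int) (l1 l2 : List Int) :
    ominList acc (l1 ++ l2) = ominList (ominList acc l1) l2 := by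
  simp [ominList, List.foldl_append]

lemma omin_le_snd (acc : Option Int) (x : Int) : ∃ w, omin acc x = some w ∧ w ≤ x := by
  cases acc with
  | none => exact ⟨x, rfl, le_refl x⟩
  | some y => exact ⟨min y x, rfl, min_le_right y x⟩

lemma omin_left_comm (acc : Option Int) (x y : Int) :
    omin (omin acc x) y = omin (omin acc y) x := by
  cases acc with
  | none => simp [omin, min_comm]
  | some z => simp only [omin]; congr 1; omega

lemma ominList_some_le (l : List Int) : ∀ (y : Int),
    ∃ d, ominList (some y) l = some d ∧ d ≤ y := by
  induction l with
  | nil => exact fun y => ⟨y, rfl, le_refl y⟩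
  | cons x l ih =>
    intro y
    obtain ⟨d, hd, hle⟩ := ih (min y x)
    exact ⟨d, hd, hle.trans (min_le_left y x)⟩

lemma ominList_attained (l : List Int) : ∀ (acc : Option Int) (d : Int),
    ominList acc l = some d →
    (d ∈ l ∨ acc = some d) ∧ (∀ x ∈ l, d ≤ x) ∧ (∀ y, acc = some y → d ≤ y) := by
  induction l with
  | nil =>
    intro acc d h
    exact ⟨Or.inr h, fun x hx => absurd hx (List.not_mem_nil), fun y hy => by rw [hy] at h; exact le_of_eq (Option.some_inj.mp h).symm⟩
  | cons x l ih =>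
    intro acc d h
    obtain ⟨hmem, hall, hacc⟩ := ih (omin acc x) d h
    obtain ⟨w, hw, hwx⟩ := omin_le_snd acc x
    have hdx : d ≤ x := (hacc w hw).trans hwx
    constructor
    · rcases hmem with hm | hm
      · exact Or.inl (List.mem_cons_of_mem _ hm)
      · cases acc with
        | none =>
          simp only [omin] at hm
          exact Or.inl (by rw [← Option.some_inj.mp hm]; exact List.mem_cons_self)
        | some z =>
          simp only [omin] at hm
          have hz := Option.some_inj.mp hm
          rcases min_choice z x with hc | hc
          · exact Or.inr (by rw [hc] at hz; rw [hz])
          · exact Or.inl (by rw [hc] at hz; rw [← hz]; exact List.mem_cons_self)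
    refine ⟨fun y hy => ?_, fun y hy => ?_⟩
    · rcases List.mem_cons.mp hy with rfl | hy'
      · exact hdx
      · exact hall y hy'
    · cases acc with
      | none => cases hy
      | some z =>
        have : omin (some z) x = some (min z x) := rfl
        have h2 := hacc (min z x) this
        have := Option.some_inj.mp hy
        subst this
        exact h2.trans (min_le_left z x)

lemma ominList_le_mem (l : List Int) : ∀ (acc : Option Int) (x : Int), x ∈ l →
    ∃ d, ominList acc l = some d ∧ d ≤ x := by
  induction l with
  | nil => intro acc x hx; cases hx
  | cons a l ih =>
    intro acc x hx
    rcases List.mem_cons.mp hx with rfl | hx'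
    · obtain ⟨w, hw, hwx⟩ := omin_le_snd acc x
      obtain ⟨d, hd, hle⟩ := ominList_some_le l w
      rw [ominList] at hd ⊢
      simp only [List.foldl_cons, hw]
      exact ⟨d, hd, hle.trans hwx⟩
    · exact ih (omin acc a) x hx'

lemma ominList_perm (l1 l2 : List Int) (h : l1.Perm l2) (acc : Option Int) :
    ominList acc l1 = ominList acc l2 := by
  induction h generalizing acc with
  | nil => rfl
  | cons x h ih => exact ih (omin acc x)
  | swap x y l =>
    show ominList (omin (omin acc y) x) l = ominList (omin (omin acc x) y) l
    rw [omin_left_comm]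
  | trans h1 h2 ih1 ih2 => exact (ih1 acc).trans (ih2 acc)

-- ---- delta lemmas under HE ----
lemma delta_edge {N : Int} {E : List (Int × Int × Int)} (hE : HE N E)
    {e : Int × Int × Int} (he : e ∈ E) {da : Int} (hda : delta E e.1 = some da) :
    ∃ d, delta E e.2.1 = some d ∧ d ≤ da + e.2.2 := by
  obtain ⟨h1, h2, h3, h4⟩ := hE e he
  rw [delta_unfold E _ (by omega)]
  refine ominList_le_mem _ none _ ?_
  refine List.mem_filterMap.mpr ⟨e, he, ?_⟩
  rw [if_pos ⟨rfl, by omega, by omega⟩, hda]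
  rfl

-- chains of edges of E (at least one edge), with their total length
inductive Chain (E : List (Int × Int × Int)) : Int → Int → Int → Prop
  | single {e : Int × Int × Int} : e ∈ E → Chain E e.1 e.2.1 e.2.2
  | cons {e : Int × Int × Int} {v L : Int} : e ∈ E → Chain E e.2.1 v L → Chain E e.1 v (e.2.2 + L)

lemma Chain.snoc {E : List (Int × Int × Int)} {s a L : Int} (h : Chain E s a L)
    {e : Int × Int × Int} (he : e ∈ E) (ha : e.1 = a) : Chain E s e.2.1 (L + e.2.2) := by
  induction h with
  | @single e' hmem =>
    have hs : Chain E e.1 e.2.1 e.2.2 := Chain.single he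
    rw [ha] at hs
    exact Chain.cons hmem hs
  | @cons e' v' L' hmem hch ih =>
    have h2 := Chain.cons hmem (ih ha)
    rwa [← add_assoc] at h2

lemma delta_realize {N : Int} {E : List (Int × Int × Int)} (hE : HE N E) :
    ∀ (k : Nat) (v : Int), v.toNat ≤ k → ∀ d, delta E v = some d →
    (v = 1 ∧ d = 0) ∨ Chain E 1 v d := by
  intro k
  induction k with
  | zero =>
    intro v hk d hd
    have hv1 : v < 1 ∨ v = 1 ∨ 2 ≤ v := by omega
    rcases hv1 with h | h | h
    · rw [delta_lt_one E v h] at hd; cases hd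
    · subst h; rw [delta_one] at hd
      exact Or.inl ⟨rfl, (Option.some_inj.mp hd).symm⟩
    · omega
  | succ k ih =>
    intro v hk d hd
    have hv1 : v < 1 ∨ v = 1 ∨ 2 ≤ v := by omega
    rcases hv1 with h | h | h
    · rw [delta_lt_one E v h] at hd; cases hd
    · subst h; rw [delta_one] at hd
      exact Or.inl ⟨rfl, (Option.some_inj.mp hd).symm⟩
    · rw [delta_unfold E v h] at hd
      obtain ⟨hmem, _, _⟩ := ominList_attained _ _ _ hd
      rcases hmem with hm | hm
      · obtain ⟨e, he, hval⟩ := List.mem_filterMap.mp hm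
        by_cases hc : e.2.1 = v ∧ 0 < e.1 ∧ e.1 < v
        · rw [if_pos hc] at hval
          rcases hda : delta E e.1 with _ | da
          · rw [hda] at hval; cases hval
          · rw [hda] at hval
            simp only [Option.map_some, Option.some_inj] at hval
            obtain ⟨hc1, hc2, hc3⟩ := hc
            rcases ih e.1 (by omega) da hda with ⟨h1, h0⟩ | hch
            · refine Or.inr ?_
              have hs : Chain E e.1 e.2.1 e.2.2 := Chain.single he
              rw [h1, hc1] at hs
              have : d = e.2.2 := by omega
              rw [this]; exact hs
            · refine Or.inr ?_
              have hs := hch.snoc he rfl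
              rw [hc1] at hs
              rw [← hval]; exact hs
        · rw [if_neg hc] at hval; cases hval
      · cases hm

-- ===== A-side development =====

def NonnegT (t : List Int) : Prop := ∀ i : Int, 0 ≤ i → 0 ≤ pvIdx t i

def InvA (E : List (Int × Int × Int)) (t : List Int) : Prop :=
  ∀ v : Int, 0 ≤ v → pvIdx t v ≠ 0 → ∃ d, delta E v = some d ∧ d ≤ pvIdx t v

-- "s refines t": same length, same value at 1, positive entries stay positive and only shrink
def Sle (t s : List Int) : Prop :=
  s.length = t.length ∧ pvIdx s 1 = pvIdx t 1 ∧
  ∀ v : Int, 0 ≤ v → 0 < pvIdx t v → 0 < pvIdx s v ∧ pvIdx s v ≤ pvIdx t v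

lemma Sle.refl (t : List Int) : Sle t t := ⟨rfl, rfl, fun _ _ h => ⟨h, le_refl _⟩⟩

lemma Sle.trans {a b c : List Int} (h1 : Sle a b) (h2 : Sle b c) : Sle a c := by
  refine ⟨h2.1.trans h1.1, h2.2.1.trans h1.2.1, fun v hv hp => ?_⟩
  obtain ⟨p1, l1⟩ := h1.2.2 v hv hp
  obtain ⟨p2, l2⟩ := h2.2.2 v hv p1
  exact ⟨p2, l2.trans l1⟩

-- the semantic version of A's dfs, over normalized edge triples
def stepA (num : Int) (acc : List Int × List Int) (e : Int × Int × Int) : List Int × List Int :=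
  if e.1 = num then
    (acc.1 ++ [e.2.1],
     let nv := pvIdx acc.2 num + e.2.2
     if pvIdx acc.2 e.2.1 = 0 then pvSet acc.2 e.2.1 nv
     else if pvIdx acc.2 e.2.1 > nv then pvSet acc.2 e.2.1 nv
     else acc.2)
  else acc

def dfsSem (E : List (Int × Int × Int)) : Nat → Int → List Int → List Int
  | 0, _, t => t
  | fuel+1, num, t =>
    let p := E.foldl (stepA num) ([], t)
    p.1.foldl (fun t b => dfsSem E fuel b t) p.2

-- ---- pvIdx / pvSet lemmas ----
lemma pvSet_nonneg (t : List Int) (i : Int) (v : Int) (h : 0 ≤ i) : pvSet t i v = t.set i.toNat v := by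
  exact PySem.List.pySetD_of_nonneg _ _ h

lemma pvSet_length (t : List Int) (i v : Int) : (pvSet t i v).length = t.length := by
  exact PySem.List.length_pySetD ..

lemma pvIdx_pvSet_self (t : List Int) (i v : Int) (h0 : 0 ≤ i) (h : i.toNat < t.length) :
    pvIdx (pvSet t i v) i = v := by
  rw [pvIdx, pvSet, PySem.List.pySetD_of_nonneg _ _ h0, PySem.List.pyGet?_of_nonneg _ h0]
  simp [h]

lemma pvIdx_pvSet_ne (t : List Int) (i j v : Int) (hi : 0 ≤ i) (hj : 0 ≤ j) (hne : i ≠ j) :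
    pvIdx (pvSet t j v) i = pvIdx t i := by
  rw [pvIdx, pvIdx, pvSet, PySem.List.pySetD_of_nonneg _ _ hj,
    PySem.List.pyGet?_of_nonneg _ hi, PySem.List.pyGet?_of_nonneg _ hi, List.getElem?_set_ne]
  omega

lemma pvIdx_replicate (n : Nat) (i : Int) : pvIdx (List.replicate n 0) i = 0 := by
  rcases h : PySem.List.pyGet? (List.replicate n (0:Int)) i with _ | x
  · simp [pvIdx, h]
  · have := PySem.List.mem_of_pyGet?_eq_some _ h
    simp [pvIdx, h, List.eq_of_mem_replicate this]

lemma pvIdx_cons012 (a b c : Int) (l : List Int) :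
    pvIdx (a :: b :: c :: l) 0 = a ∧ pvIdx (a :: b :: c :: l) 1 = b ∧ pvIdx (a :: b :: c :: l) 2 = c := by
  refine ⟨?_, ?_, ?_⟩
  · rw [pvIdx, PySem.List.pyGet?_zero_cons]; rfl
  · rw [pvIdx, show (1:Int) = ((1:Nat):Int) by rfl, PySem.List.pyGet?_natCast]; rfl
  · rw [pvIdx, show (2:Int) = ((2:Nat):Int) by rfl, PySem.List.pyGet?_natCast]; rfl

lemma relax_facts {N : Int} (e : Int × Int × Int) (num : Int) (t t' : List Int)
    (hsh : 1 ≤ e.1 ∧ e.1 < e.2.1 ∧ e.2.1 ≤ N ∧ 1 ≤ e.2.2) (he1 : e.1 = num)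
    (hnum : 0 ≤ num) (hnn : NonnegT t)
    (ht' : t' = (if pvIdx t e.2.1 = 0 then pvSet t e.2.1 (pvIdx t num + e.2.2)
      else if pvIdx t e.2.1 > pvIdx t num + e.2.2 then pvSet t e.2.1 (pvIdx t num + e.2.2)
      else t)) :
    t'.length = t.length ∧ (∀ i : Int, 0 ≤ i → i ≠ e.2.1 → pvIdx t' i = pvIdx t i) ∧
    NonnegT t' ∧ Sle t t' ∧
    (e.2.1.toNat < t.length → 0 < pvIdx t' e.2.1 ∧ pvIdx t' e.2.1 ≤ pvIdx t num + e.2.2) ∧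
    (pvIdx t' e.2.1 = pvIdx t e.2.1 ∨ pvIdx t' e.2.1 = pvIdx t num + e.2.2) := by
  obtain ⟨h1, h2, h3, h4⟩ := hsh
  have hb0 : (0:Int) ≤ e.2.1 := by omega
  have hnv : 1 ≤ pvIdx t num + e.2.2 := by have := hnn num hnum; omega
  have hkey : (t' = t ∧ ¬ (0 < pvIdx t num + e.2.2 ∧ pvIdx t e.2.1 = 0)
        ∧ (pvIdx t e.2.1 ≠ 0 → pvIdx t e.2.1 ≤ pvIdx t num + e.2.2))
      ∨ (t' = pvSet t e.2.1 (pvIdx t num + e.2.2)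
        ∧ (pvIdx t e.2.1 = 0 ∨ pvIdx t num + e.2.2 < pvIdx t e.2.1)) := by
    by_cases hz : pvIdx t e.2.1 = 0
    · right; rw [ht', if_pos hz]; exact ⟨rfl, Or.inl hz⟩
    · by_cases hgt : pvIdx t e.2.1 > pvIdx t num + e.2.2
      · right; rw [ht', if_neg hz, if_pos hgt]; exact ⟨rfl, Or.inr hgt⟩
      · left; rw [ht', if_neg hz, if_neg hgt]; exact ⟨rfl, by omega, fun _ => by omega⟩
  rcases hkey with ⟨heq, hno, hle⟩ | ⟨heq, hcase⟩ <;> rw [heq]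
  · refine ⟨rfl, fun i _ _ => rfl, hnn, Sle.refl t, fun hin => ?_, Or.inl rfl⟩
    have := hnn e.2.1 hb0
    constructor
    · rcases (by omega : pvIdx t e.2.1 = 0 ∨ 0 < pvIdx t e.2.1) with hc | hc
      · exact absurd ⟨by omega, hc⟩ hno
      · exact hc
    · exact hle (by rintro h0; exact hno ⟨by omega, h0⟩)
  · have hlen := pvSet_length t e.2.1 (pvIdx t num + e.2.2)
    have hother : ∀ i : Int, 0 ≤ i → i ≠ e.2.1 →
        pvIdx (pvSet t e.2.1 (pvIdx t num + e.2.2)) i = pvIdx t i :=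
      fun i hi hne => pvIdx_pvSet_ne t i e.2.1 _ hi hb0 hne
    by_cases hin : e.2.1.toNat < t.length
    · have hself := pvIdx_pvSet_self t e.2.1 (pvIdx t num + e.2.2) hb0 hin
      refine ⟨hlen, hother, ?_, ?_, fun _ => ?_, Or.inr hself⟩
      · intro i hi
        by_cases hie : i = e.2.1
        · rw [hie, hself]; omega
        · rw [hother i hi hie]; exact hnn i hi
      · refine ⟨hlen, hother 1 (by omega) (by omega), fun v hv hp => ?_⟩
        by_cases hve : v = e.2.1
        · subst hve; rw [hself]
          rcases hcase with hc | hc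
          · omega
          · constructor <;> omega
        · rw [hother v hv hve]; exact ⟨hp, le_refl _⟩
      · rw [hself]; exact ⟨by omega, le_refl _⟩
    · have hnoop : pvSet t e.2.1 (pvIdx t num + e.2.2) = t := by
        rw [pvSet_nonneg t e.2.1 _ hb0]
        exact List.set_eq_of_length_le (by omega)
      rw [hnoop]
      exact ⟨rfl, fun i _ _ => rfl, hnn, Sle.refl t, fun h => absurd h hin, Or.inl rfl⟩

-- A's in-place row normalization, as a function (the lambda inside solution)
def normRow (r : List Int) : List Int :=
  match r with
  | a :: b :: rest => if a > b then b :: a :: rest else a :: b :: rest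
  | r => r

-- the body of A's edge loop, reading a raw row
def stepRow (num : Int) (acc : List Int × List Int) (r : List Int) : List Int × List Int :=
  if pvIdx r 0 = num then
    (acc.1 ++ [pvIdx r 1],
     let nv := pvIdx acc.2 num + pvIdx r 2
     if pvIdx acc.2 (pvIdx r 1) = 0 then pvSet acc.2 (pvIdx r 1) nv
     else if pvIdx acc.2 (pvIdx r 1) > nv then pvSet acc.2 (pvIdx r 1) nv
     else acc.2)
  else acc

lemma row_eq (r : List Int) (hlen : 3 ≤ r.length) (num : Int) (acc : List Int × List Int) :
    stepRow num acc (normRow r) = stepA num acc (edgeOf r) := by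
  rcases r with _ | ⟨a, _ | ⟨b, _ | ⟨c, rest⟩⟩⟩ <;> simp at hlen
  obtain ⟨h0, h1, h2⟩ := pvIdx_cons012 a b c rest
  obtain ⟨g0, g1, g2⟩ := pvIdx_cons012 b a c rest
  by_cases hab : a > b
  · have hnorm : normRow (a :: b :: c :: rest) = b :: a :: c :: rest := by
      simp [normRow, hab]
    have hedge : edgeOf (a :: b :: c :: rest) = (b, a, c) := by
      rw [edgeOf, h0, h1, h2, if_neg (by omega)]
    rw [hnorm, hedge, stepRow, stepA, g0, g1, g2]
  · have hnorm : normRow (a :: b :: c :: rest) = a :: b :: c :: rest := by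
      simp [normRow, hab]
    have hedge : edgeOf (a :: b :: c :: rest) = (a, b, c) := by
      rw [edgeOf, h0, h1, h2, if_pos (by omega)]
    rw [hnorm, hedge, stepRow, stepA, h0, h1, h2]

-- ---- correspondence: A's port equals the semantic dfs over normalized triples ----
lemma dfsA_eq_dfsSem (road : List (List Int)) (hlen : ∀ r ∈ road, 3 ≤ r.length) :
    ∀ (fuel : Nat) (num : Int) (t : List Int),
    dfsA (road.map (fun r => match r with
      | a :: b :: rest => if a > b then b :: a :: rest else a :: b :: rest
      | r => r)) fuel num t = dfsSem (road.map edgeOf) fuel num t := by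
  have hmapeq : (road.map (fun r => match r with
      | a :: b :: rest => if a > b then b :: a :: rest else a :: b :: rest
      | r => r)) = road.map normRow := rfl
  intro fuel
  induction fuel with
  | zero => intro num t; rfl
  | succ fuel ih =>
    intro num t
    rw [hmapeq]
    show (let p := (road.map normRow).foldl (stepRow num) ([], t)
          p.1.foldl (fun time t => dfsA (road.map normRow) fuel t time) p.2)
        = (let p := (road.map edgeOf).foldl (stepA num) ([], t)
           p.1.foldl (fun t b => dfsSem (road.map edgeOf) fuel b t) p.2)
    have hfold : (road.map normRow).foldl (stepRow num) ([], t)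
        = (road.map edgeOf).foldl (stepA num) ([], t) := by
      rw [List.foldl_map, List.foldl_map]
      refine PySem.List.foldl_congr_mem _ _ _ _ (fun acc r hr => ?_)
      exact row_eq r (hlen r hr) num acc
    simp only [hfold]
    refine PySem.List.foldl_congr_mem _ _ _ _ (fun acc b hb => ?_)
    rw [← hmapeq]
    exact ih b acc

-- ---- the edge loop of one dfs call ----
lemma edgeLoop_master {N : Int} {E : List (Int × Int × Int)} (hE : HE N E) (num : Int) :
    ∀ (l : List (Int × Int × Int)) (hl : ∀ e ∈ l, e ∈ E) (temp0 : List Int) (t : List Int)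
      (hnum : 0 ≤ num) (hnn : NonnegT t),
    (l.foldl (stepA num) (temp0, t)).1
      = temp0 ++ l.filterMap (fun e => if e.1 = num then some e.2.1 else none) ∧
    pvIdx (l.foldl (stepA num) (temp0, t)).2 num = pvIdx t num ∧
    NonnegT (l.foldl (stepA num) (temp0, t)).2 ∧
    Sle t (l.foldl (stepA num) (temp0, t)).2 ∧
    (t.length = (N+1).toNat → ∀ e ∈ l, e.1 = num →
      0 < pvIdx (l.foldl (stepA num) (temp0, t)).2 e.2.1 ∧
      pvIdx (l.foldl (stepA num) (temp0, t)).2 e.2.1 ≤ pvIdx t num + e.2.2) ∧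
    (InvA E t → (∃ d, delta E num = some d ∧ d ≤ pvIdx t num) →
      InvA E (l.foldl (stepA num) (temp0, t)).2) := by
  intro l
  induction l with
  | nil =>
    intro hl temp0 t hnum hnn
    exact ⟨by simp, rfl, hnn, Sle.refl t, fun _ e he => absurd he (List.not_mem_nil),
      fun hI _ => hI⟩
  | cons e rest ih =>
    intro hl temp0 t hnum hnn
    have heE := hl e List.mem_cons_self
    obtain ⟨hs1, hs2, hs3, hs4⟩ := hE e heE
    have hrest : ∀ e' ∈ rest, e' ∈ E := fun e' h' => hl e' (List.mem_cons_of_mem _ h')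
    by_cases he1 : e.1 = num
    · set t' := (if pvIdx t e.2.1 = 0 then pvSet t e.2.1 (pvIdx t num + e.2.2)
        else if pvIdx t e.2.1 > pvIdx t num + e.2.2 then pvSet t e.2.1 (pvIdx t num + e.2.2)
        else t) with ht'def
      have hstep : (e :: rest).foldl (stepA num) (temp0, t)
          = rest.foldl (stepA num) (temp0 ++ [e.2.1], t') := by
        simp only [List.foldl_cons]
        congr 1
        simp only [stepA, if_pos he1, ht'def]
      obtain ⟨hrlen, hroth, hrnn, hrsle, hrpos, hrval⟩ :=
        relax_facts (N := N) e num t t' ⟨hs1, hs2, hs3, hs4⟩ he1 hnum hnn ht'def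
      have hnum_ne : num ≠ e.2.1 := by omega
      obtain ⟨ih1, ih2, ih3, ih4, ih5, ih6⟩ := ih hrest (temp0 ++ [e.2.1]) t' hnum hrnn
      rw [hstep]
      refine ⟨?_, ?_, ih3, hrsle.trans ih4, ?_, ?_⟩
      · rw [ih1, List.filterMap_cons]
        simp [he1]
      · rw [ih2]
        exact hroth num hnum hnum_ne
      · intro hlen e' he' he'1
        rcases List.mem_cons.mp he' with rfl | hmem
        · have hposn := hrpos (by omega)
          obtain ⟨hp, hle2⟩ := ih4.2.2 e'.2.1 (by omega) hposn.1
          exact ⟨hp, hle2.trans hposn.2⟩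
        · have hb := ih5 (by rw [hrlen]; exact hlen) e' hmem he'1
          rw [hroth num hnum hnum_ne] at hb
          exact hb
      · intro hInv hd
        refine ih6 ?_ ?_
        · intro v hv hne
          by_cases hvb : v = e.2.1
          · subst hvb
            rcases hrval with hsame | hnv
            · rw [hsame] at hne ⊢
              exact hInv _ hv hne
            · rw [hnv]
              obtain ⟨d, hd1, hd2⟩ := hd
              obtain ⟨db, hdb1, hdb2⟩ := delta_edge hE heE (da := d) (by rw [he1]; exact hd1)
              exact ⟨db, hdb1, by omega⟩
          · rw [hroth v hv hvb] at hne ⊢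
            exact hInv v hv hne
        · obtain ⟨d, hd1, hd2⟩ := hd
          exact ⟨d, hd1, by rw [hroth num hnum hnum_ne]; exact hd2⟩
    · have hstep : (e :: rest).foldl (stepA num) (temp0, t)
          = rest.foldl (stepA num) (temp0, t) := by
        simp only [List.foldl_cons, stepA, if_neg he1]
      obtain ⟨ih1, ih2, ih3, ih4, ih5, ih6⟩ := ih hrest temp0 t hnum hnn
      rw [hstep]
      refine ⟨?_, ih2, ih3, ih4, ?_, ih6⟩
      · rw [ih1, List.filterMap_cons]
        simp [he1]
      · intro hlen e' he' he'1
        rcases List.mem_cons.mp he' with rfl | hmem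
        · exact absurd he'1 he1
        · exact ih5 hlen e' hmem he'1

-- ---- dfs preserves Sle / Nonneg (no delta knowledge needed) ----
lemma dfs_sle {N : Int} {E : List (Int × Int × Int)} (hE : HE N E) :
    ∀ (fuel : Nat) (num : Int) (t : List Int), 0 ≤ num → NonnegT t →
    NonnegT (dfsSem E fuel num t) ∧ Sle t (dfsSem E fuel num t) := by
  intro fuel
  induction fuel with
  | zero => intro num t hnum hnn; exact ⟨hnn, Sle.refl t⟩
  | succ fuel ih =>
    intro num t hnum hnn
    have aux : ∀ (bs : List Int) (t0 : List Int), (∀ b ∈ bs, 0 ≤ b) → NonnegT t0 →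
        NonnegT (bs.foldl (fun t b => dfsSem E fuel b t) t0) ∧
        Sle t0 (bs.foldl (fun t b => dfsSem E fuel b t) t0) := by
      intro bs
      induction bs with
      | nil => intro t0 _ hnn0; exact ⟨hnn0, Sle.refl t0⟩
      | cons b bs ihb =>
        intro t0 hb hnn0
        obtain ⟨hn1, hs1⟩ := ih b t0 (hb b List.mem_cons_self) hnn0
        obtain ⟨hn2, hs2⟩ := ihb (dfsSem E fuel b t0)
          (fun x hx => hb x (List.mem_cons_of_mem _ hx)) hn1
        exact ⟨hn2, hs1.trans hs2⟩
    obtain ⟨h1, h2, h3, h4, h5, h6⟩ := edgeLoop_master hE num E (fun e he => he) [] t hnum hnn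
    have hmem : ∀ b ∈ (E.foldl (stepA num) ([], t)).1, 0 ≤ b := by
      intro b hb
      rw [h1] at hb
      simp only [List.nil_append] at hb
      obtain ⟨e, he, hval⟩ := List.mem_filterMap.mp hb
      by_cases hc : e.1 = num
      · rw [if_pos hc] at hval
        have h21 := Option.some_inj.mp hval
        obtain ⟨he1, he2, _, _⟩ := hE e he
        omega
      · rw [if_neg hc] at hval; cases hval
    obtain ⟨hn, hs⟩ := aux (E.foldl (stepA num) ([], t)).1 (E.foldl (stepA num) ([], t)).2 hmem h3
    exact ⟨hn, h4.trans hs⟩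

lemma foldl_dfs_sle {N : Int} {E : List (Int × Int × Int)} (hE : HE N E) (fuel : Nat) :
    ∀ (bs : List Int) (t : List Int), (∀ b ∈ bs, 0 ≤ b) → NonnegT t →
    NonnegT (bs.foldl (fun t b => dfsSem E fuel b t) t) ∧
    Sle t (bs.foldl (fun t b => dfsSem E fuel b t) t) := by
  intro bs
  induction bs with
  | nil => intro t _ hnn; exact ⟨hnn, Sle.refl t⟩
  | cons b bs ihb =>
    intro t hb hnn
    obtain ⟨hn1, hs1⟩ := dfs_sle hE fuel b t (hb b List.mem_cons_self) hnn
    obtain ⟨hn2, hs2⟩ := ihb (dfsSem E fuel b t) (fun x hx => hb x (List.mem_cons_of_mem _ hx)) hn1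
    exact ⟨hn2, hs1.trans hs2⟩

-- ---- dfs preserves the invariant ----
lemma dfs_inv {N : Int} {E : List (Int × Int × Int)} (hE : HE N E) :
    ∀ (fuel : Nat) (num : Int) (t : List Int), 0 ≤ num → t.length = (N+1).toNat →
    NonnegT t → InvA E t → (∃ d, delta E num = some d ∧ d ≤ pvIdx t num) →
    InvA E (dfsSem E fuel num t) := by
  intro fuel
  induction fuel with
  | zero => intro num t hnum hlen hnn hI hd; exact hI
  | succ fuel ih =>
    intro num t hnum hlen hnn hI hd
    obtain ⟨h1, h2, h3, h4, h5, h6⟩ := edgeLoop_master hE num E (fun e he => he) [] t hnum hnn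
    have hInv' := h6 hI hd
    have hplen : (E.foldl (stepA num) ([], t)).2.length = (N+1).toNat := by
      rw [h4.1, hlen]
    have hpos : ∀ b ∈ (E.foldl (stepA num) ([], t)).1,
        0 < pvIdx (E.foldl (stepA num) ([], t)).2 b ∧ 1 ≤ b := by
      intro b hb
      rw [h1] at hb
      simp only [List.nil_append] at hb
      obtain ⟨e, he, hval⟩ := List.mem_filterMap.mp hb
      by_cases hc : e.1 = num
      · rw [if_pos hc] at hval
        have h21 := Option.some_inj.mp hval
        obtain ⟨he1, he2, _, _⟩ := hE e he
        have := h5 hlen e he hc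
        rw [h21] at this
        exact ⟨this.1, by omega⟩
      · rw [if_neg hc] at hval; cases hval
    have aux : ∀ (bs : List Int) (cur : List Int),
        (∀ b ∈ bs, 0 < pvIdx cur b ∧ 1 ≤ b) → cur.length = (N+1).toNat →
        NonnegT cur → InvA E cur →
        InvA E (bs.foldl (fun t b => dfsSem E fuel b t) cur) := by
      intro bs
      induction bs with
      | nil => intro cur _ _ _ h; exact h
      | cons b bs ihb =>
        intro cur hb hlenc hnnc hIc
        obtain ⟨hpb, hb1⟩ := hb b List.mem_cons_self
        have hdb : ∃ d, delta E b = some d ∧ d ≤ pvIdx cur b := hIc b (by omega) (by omega)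
        have hInext := ih b cur (by omega) hlenc hnnc hIc hdb
        obtain ⟨hnn2, hsl2⟩ := dfs_sle hE fuel b cur (by omega) hnnc
        refine ihb (dfsSem E fuel b cur) ?_ ?_ hnn2 hInext
        · intro x hx
          obtain ⟨hpx, hx1⟩ := hb x (List.mem_cons_of_mem _ hx)
          exact ⟨(hsl2.2.2 x (by omega) hpx).1, hx1⟩
        · rw [hsl2.1, hlenc]
    exact aux _ _ hpos hplen h3 hInv'

lemma chain_end {N : Int} {E : List (Int × Int × Int)} (hE : HE N E) {s v L : Int}
    (h : Chain E s v L) : 2 ≤ v ∧ s < v ∧ v ≤ N ∧ 1 ≤ s := by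
  induction h with
  | @single e hmem => obtain ⟨h1, h2, h3, _⟩ := hE e hmem; exact ⟨by omega, h2, h3, h1⟩
  | @cons e v' L' hmem hch ih =>
    obtain ⟨h1, h2, h3, _⟩ := hE e hmem
    exact ⟨ih.1, by omega, ih.2.2.1, h1⟩

-- ---- dfs realizes every chain bound ----
lemma dfs_chain_bound {N : Int} {E : List (Int × Int × Int)} (hE : HE N E) :
    ∀ (fuel : Nat) (s v L : Int) (t : List Int), Chain E s v L →
    t.length = (N+1).toNat → NonnegT t → (N + 1 - s).toNat ≤ fuel →
    0 < pvIdx (dfsSem E fuel s t) v ∧ pvIdx (dfsSem E fuel s t) v ≤ pvIdx t s + L := by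
  intro fuel s v L t hch
  induction hch generalizing fuel t with
  | @single e hmem =>
    intro hlen hnn hfuel
    obtain ⟨hs1, hs2, hs3, hs4⟩ := hE e hmem
    cases fuel with
    | zero => exfalso; omega
    | succ f =>
      obtain ⟨h1, h2, h3, h4, h5, h6⟩ :=
        edgeLoop_master hE e.1 E (fun x hx => hx) [] t (by omega) hnn
      have hb := h5 hlen e hmem rfl
      have hmempos : ∀ b ∈ (E.foldl (stepA e.1) ([], t)).1, 0 ≤ b := by
        intro b hbm
        rw [h1] at hbm
        simp only [List.nil_append] at hbm
        obtain ⟨e', he', hval⟩ := List.mem_filterMap.mp hbm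
        by_cases hc : e'.1 = e.1
        · rw [if_pos hc] at hval
          have := Option.some_inj.mp hval
          obtain ⟨g1, g2, _, _⟩ := hE e' he'
          omega
        · rw [if_neg hc] at hval; cases hval
      obtain ⟨hnf, hsf⟩ := foldl_dfs_sle hE f _ _ hmempos h3
      obtain ⟨hp, hle⟩ := hsf.2.2 e.2.1 (by omega) hb.1
      exact ⟨hp, hle.trans hb.2⟩
  | @cons e v' L' hmem hch2 ihc =>
    intro hlen hnn hfuel
    obtain ⟨hs1, hs2, hs3, hs4⟩ := hE e hmem
    obtain ⟨hv2, hlt, hvN, _⟩ := chain_end hE hch2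
    cases fuel with
    | zero => exfalso; omega
    | succ f =>
      obtain ⟨h1, h2, h3, h4, h5, h6⟩ :=
        edgeLoop_master hE e.1 E (fun x hx => hx) [] t (by omega) hnn
      have hb := h5 hlen e hmem rfl
      have hmempos : ∀ b ∈ (E.foldl (stepA e.1) ([], t)).1, 0 ≤ b := by
        intro b hbm
        rw [h1] at hbm
        simp only [List.nil_append] at hbm
        obtain ⟨e', he', hval⟩ := List.mem_filterMap.mp hbm
        by_cases hc : e'.1 = e.1
        · rw [if_pos hc] at hval
          have := Option.some_inj.mp hval
          obtain ⟨g1, g2, _, _⟩ := hE e' he'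
          omega
        · rw [if_neg hc] at hval; cases hval
      have hmem21 : e.2.1 ∈ (E.foldl (stepA e.1) ([], t)).1 := by
        rw [h1]
        simp only [List.nil_append]
        exact List.mem_filterMap.mpr ⟨e, hmem, by rw [if_pos rfl]⟩
      obtain ⟨l1, l2, hsplit⟩ := List.append_of_mem hmem21
      have hshow : dfsSem E (f+1) e.1 t
          = l2.foldl (fun t b => dfsSem E f b t)
              (dfsSem E f e.2.1 (l1.foldl (fun t b => dfsSem E f b t)
                (E.foldl (stepA e.1) ([], t)).2)) := by
        show (E.foldl (stepA e.1) ([], t)).1.foldl (fun t b => dfsSem E f b t)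
            (E.foldl (stepA e.1) ([], t)).2 = _
        rw [hsplit, List.foldl_append, List.foldl_cons]
      obtain ⟨hnn2, hsl2⟩ := foldl_dfs_sle hE f l1 (E.foldl (stepA e.1) ([], t)).2
        (fun b hbm => hmempos b (by rw [hsplit]; exact List.mem_append_left _ hbm)) h3
      obtain ⟨hp2, hle2⟩ := hsl2.2.2 e.2.1 (by omega) hb.1
      have hlen2 : (l1.foldl (fun t b => dfsSem E f b t)
          (E.foldl (stepA e.1) ([], t)).2).length = (N+1).toNat := by
        rw [hsl2.1, h4.1, hlen]
      have ihres := ihc f _ hlen2 hnn2 (by omega)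
      obtain ⟨hnn3, _⟩ := dfs_sle hE f e.2.1 _ (by omega) hnn2
      obtain ⟨hnn4, hsl4⟩ := foldl_dfs_sle hE f l2 _
        (fun b hbm => hmempos b (by rw [hsplit]; exact List.mem_append_right _ (List.mem_cons_of_mem _ hbm))) hnn3
      obtain ⟨hpf, hlef⟩ := hsl4.2.2 v' (by omega) ihres.1
      rw [hshow]
      constructor
      · exact hpf
      · have := ihres.2
        omega

-- ---- final characterization of A's table ----
lemma A_final {N : Int} {E : List (Int × Int × Int)} (hE : HE N E) (hN : 1 ≤ N) :
    ∀ v : Int, 1 ≤ v → v ≤ N →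
    pvIdx (dfsSem E (N.toNat + 2) 1 (List.replicate (N+1).toNat 0)) v = (delta E v).getD 0 := by
  intro v hv1 hvN
  have hlen0 : (List.replicate (N+1).toNat (0:Int)).length = (N+1).toNat :=
    List.length_replicate
  have hnn0 : NonnegT (List.replicate (N+1).toNat (0:Int)) := by
    intro i hi; rw [pvIdx_replicate]
  have hI0 : InvA E (List.replicate (N+1).toNat (0:Int)) := by
    intro w hw hne; exact absurd (pvIdx_replicate _ w) hne
  have hd0 : ∃ d, delta E 1 = some d ∧ d ≤ pvIdx (List.replicate (N+1).toNat (0:Int)) 1 :=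
    ⟨0, delta_one E, by rw [pvIdx_replicate]⟩
  have hIf := dfs_inv hE (N.toNat+2) 1 (List.replicate (N+1).toNat (0:Int))
    (by omega) hlen0 hnn0 hI0 hd0
  obtain ⟨hnnf, hslef⟩ := dfs_sle hE (N.toNat+2) 1 (List.replicate (N+1).toNat (0:Int))
    (by omega) hnn0
  rcases eq_or_lt_of_le hv1 with h1 | h1
  · rw [← h1, delta_one]
    rw [hslef.2.1, pvIdx_replicate]
    rfl
  · rcases hdv : delta E v with _ | d
    · show _ = (0:Int)
      by_contra hne0
      obtain ⟨d, hd1, _⟩ := hIf v (by omega) hne0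
      rw [hdv] at hd1
      cases hd1
    · rcases delta_realize hE v.toNat v (le_refl _) d hdv with ⟨hveq, _⟩ | hch
      · omega
      · have hb := dfs_chain_bound hE (N.toNat+2) 1 v d
          (List.replicate (N+1).toNat (0:Int)) hch hlen0 hnn0 (by omega)
        rw [pvIdx_replicate] at hb
        obtain ⟨d', hd'1, hd'2⟩ := hIf v (by omega) (by omega)
        rw [hdv] at hd'1
        have hdd := Option.some_inj.mp hd'1
        show _ = d
        omega

-- ===== B-side development =====

-- the body of B's edge scan, over a normalized triple
def stepB (u : Int) (dist : PySem.Dict Int Int) (e : Int × Int × Int) : PySem.Dict Int Int :=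
  if e.1 = u then
    let nd := (PySem.Dict.get? dist u).getD 0 + e.2.2
    match PySem.Dict.get? dist e.2.1 with
    | none => PySem.Dict.insert dist e.2.1 nd
    | some db => if nd < db then PySem.Dict.insert dist e.2.1 nd else dist
  else dist

-- B's row body computes exactly stepB on the normalized triple of the row
lemma rowB_eq (u : Int) (dist : PySem.Dict Int Int) (r : List Int) :
    (let ab := if pvIdx r 0 ≤ pvIdx r 1 then (pvIdx r 0, pvIdx r 1)
               else (pvIdx r 1, pvIdx r 0)
     if ab.1 = u then
       let nd := (PySem.Dict.get? dist u).getD 0 + pvIdx r 2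
       match PySem.Dict.get? dist ab.2 with
       | none => PySem.Dict.insert dist ab.2 nd
       | some db => if nd < db then PySem.Dict.insert dist ab.2 nd else dist
     else dist) = stepB u dist (edgeOf r) := by
  by_cases hab : pvIdx r 0 ≤ pvIdx r 1
  · simp only [edgeOf, stepB, if_pos hab]
  · simp only [edgeOf, stepB, if_neg hab]

def JB (E : List (Int × Int × Int)) (N u : Int) (dist : PySem.Dict Int Int) : Prop :=
  ∀ w : Int, 1 ≤ w → w ≤ N →
    PySem.Dict.get? dist w = (if w ≤ u then delta E w else ominList none (cand E u w))

lemma cand_one (E : List (Int × Int × Int)) (w : Int) : cand E 1 w = [] := by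
  refine List.filterMap_eq_nil_iff.mpr (fun e he => ?_)
  rw [if_neg]
  rintro ⟨_, h2, h3⟩
  omega

lemma cand_succ_perm {N : Int} {E : List (Int × Int × Int)} (hE : HE N E) (u w : Int) (hu : 1 ≤ u) :
    (cand E (u+1) w).Perm
      (cand E u w ++ E.filterMap (fun e => if e.1 = u ∧ e.2.1 = w then
        (delta E u).map (fun d => d + e.2.2) else none)) := by
  have main : ∀ l : List (Int × Int × Int),
      (l.filterMap (fun e => if e.2.1 = w ∧ 0 < e.1 ∧ e.1 < u+1 then
        (delta E e.1).map (fun d => d + e.2.2) else none)).Perm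
      ((l.filterMap (fun e => if e.2.1 = w ∧ 0 < e.1 ∧ e.1 < u then
        (delta E e.1).map (fun d => d + e.2.2) else none)) ++
       (l.filterMap (fun e => if e.1 = u ∧ e.2.1 = w then
        (delta E u).map (fun d => d + e.2.2) else none))) := by
    intro l
    induction l with
    | nil => simp
    | cons e l ihl =>
      by_cases hA : e.2.1 = w ∧ 0 < e.1 ∧ e.1 < u + 1
      · by_cases heu : e.1 = u
        · have hf : ¬ (e.2.1 = w ∧ 0 < e.1 ∧ e.1 < u) := by rintro ⟨_, _, h⟩; omega
          have hg : e.1 = u ∧ e.2.1 = w := ⟨heu, hA.1⟩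
          rcases hv : (delta E e.1).map (fun d => d + e.2.2) with _ | x
          all_goals have hv2 : (delta E u).map (fun d => d + e.2.2)
              = (delta E e.1).map (fun d => d + e.2.2) := by rw [heu]
          · simp only [List.filterMap_cons, if_pos hA, if_pos hg, if_neg hf, hv2, hv]
            exact ihl
          · simp only [List.filterMap_cons, if_pos hA, if_pos hg, if_neg hf, hv2, hv]
            exact (ihl.cons x).trans List.perm_middle.symm
        · have hf : e.2.1 = w ∧ 0 < e.1 ∧ e.1 < u := ⟨hA.1, hA.2.1, by omega⟩
          have hg : ¬ (e.1 = u ∧ e.2.1 = w) := by rintro ⟨h, _⟩; exact heu h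
          rcases hv : (delta E e.1).map (fun d => d + e.2.2) with _ | x
          · simp only [List.filterMap_cons, if_pos hA, if_pos hf, if_neg hg, hv]
            exact ihl
          · simp only [List.filterMap_cons, if_pos hA, if_pos hf, if_neg hg, hv]
            exact ihl.cons x
      · have hf : ¬ (e.2.1 = w ∧ 0 < e.1 ∧ e.1 < u) := by
          rintro ⟨hh1, hh2, hh3⟩; exact hA ⟨hh1, hh2, by omega⟩
        have hg : ¬ (e.1 = u ∧ e.2.1 = w) := by
          rintro ⟨hh1, hh2⟩; exact hA ⟨hh2, by omega, by omega⟩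
        simp only [List.filterMap_cons, if_neg hA, if_neg hf, if_neg hg]
        exact ihl
  exact main E

lemma B_inner {N : Int} {E : List (Int × Int × Int)} (hE : HE N E)
    (u du : Int) (hu : 1 ≤ u) (huN : u ≤ N) (hdu : delta E u = some du) :
    ∀ (l l0 : List (Int × Int × Int)), E = l0 ++ l →
    ∀ dist : PySem.Dict Int Int,
    (∀ w : Int, 1 ≤ w → w ≤ N → PySem.Dict.get? dist w = if w ≤ u then delta E w
        else ominList none (cand E u w ++ l0.filterMap (fun e =>
          if e.1 = u ∧ e.2.1 = w then some (du + e.2.2) else none))) →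
    ∀ w : Int, 1 ≤ w → w ≤ N → PySem.Dict.get? (l.foldl (stepB u) dist) w
      = if w ≤ u then delta E w
        else ominList none (cand E u w ++ E.filterMap (fun e =>
          if e.1 = u ∧ e.2.1 = w then some (du + e.2.2) else none)) := by
  intro l
  induction l with
  | nil =>
    intro l0 hsplit dist hinv
    rw [List.append_nil] at hsplit
    subst hsplit
    exact hinv
  | cons e l ihl =>
    intro l0 hsplit dist hinv
    have heE : e ∈ E := by rw [hsplit]; exact List.mem_append_right l0 List.mem_cons_self
    obtain ⟨hs1, hs2, hs3, hs4⟩ := hE e heE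
    have hsplit' : E = (l0 ++ [e]) ++ l := by rw [hsplit]; simp
    rw [List.foldl_cons]
    by_cases he1 : e.1 = u
    · have hvu : PySem.Dict.get? dist u = some du := by
        have h := hinv u (by omega) (by omega)
        rw [if_pos (le_refl u)] at h
        rw [h, hdu]
      have hbu : u < e.2.1 := by omega
      have hXdef := hinv e.2.1 (by omega) (by omega)
      rw [if_neg (by omega)] at hXdef
      have hpart : ∀ w : Int, (l0 ++ [e]).filterMap (fun e' =>
            if e'.1 = u ∧ e'.2.1 = w then some (du + e'.2.2) else none)
          = l0.filterMap (fun e' => if e'.1 = u ∧ e'.2.1 = w then some (du + e'.2.2) else none)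
            ++ (if e.2.1 = w then [du + e.2.2] else []) := by
        intro w
        rw [List.filterMap_append]
        congr 1
        by_cases hw : e.2.1 = w
        · simp [hw, he1]
        · simp [hw]
      have hafter_b : PySem.Dict.get? (stepB u dist e) e.2.1
          = omin (PySem.Dict.get? dist e.2.1) (du + e.2.2) := by
        rcases hX : PySem.Dict.get? dist e.2.1 with _ | db
        · simp only [stepB, if_pos he1, hvu, hX, Option.getD_some]
          rw [PySem.Dict.get?_insert_self]
          rfl
        · by_cases hlt : du + e.2.2 < db
          · simp only [stepB, if_pos he1, hvu, hX, Option.getD_some, if_pos hlt]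
            rw [PySem.Dict.get?_insert_self]
            simp only [omin]
            congr 1
            omega
          · simp only [stepB, if_pos he1, hvu, hX, Option.getD_some, if_neg hlt]
            simp only [omin]
            congr 1
            omega
      have hafter_oth : ∀ w : Int, w ≠ e.2.1 →
          PySem.Dict.get? (stepB u dist e) w = PySem.Dict.get? dist w := by
        intro w hwb
        rcases hX : PySem.Dict.get? dist e.2.1 with _ | db
        · simp only [stepB, if_pos he1, hvu, hX, Option.getD_some]
          exact PySem.Dict.get?_insert_of_ne _ _ hwb
        · by_cases hlt : du + e.2.2 < db
          · simp only [stepB, if_pos he1, hvu, hX, Option.getD_some, if_pos hlt]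
            exact PySem.Dict.get?_insert_of_ne _ _ hwb
          · simp only [stepB, if_pos he1, hvu, hX, Option.getD_some, if_neg hlt]
      have hafter : ∀ w : Int, 1 ≤ w → w ≤ N → PySem.Dict.get? (stepB u dist e) w
          = if w ≤ u then delta E w
            else ominList none (cand E u w ++ (l0 ++ [e]).filterMap (fun e' =>
              if e'.1 = u ∧ e'.2.1 = w then some (du + e'.2.2) else none)) := by
        intro w hw1 hwN
        rw [hpart w]
        by_cases hwb : w = e.2.1
        · subst hwb
          rw [if_neg (by omega), if_pos rfl, ← List.append_assoc, ominList_append]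
          have homin : ∀ X : Option Int, ominList X [du + e.2.2] = omin X (du + e.2.2) :=
            fun X => rfl
          rw [homin, hafter_b, hXdef]
        · rw [hafter_oth w hwb, hinv w hw1 hwN]
          by_cases hwu : w ≤ u
          · rw [if_pos hwu, if_pos hwu]
          · rw [if_neg hwu, if_neg hwu, if_neg (fun h => hwb h.symm), List.append_nil]
      exact ihl (l0 ++ [e]) hsplit' (stepB u dist e) hafter
    · have hkeep : stepB u dist e = dist := by
        simp only [stepB, if_neg he1]
      rw [hkeep]
      refine ihl (l0 ++ [e]) hsplit' dist ?_
      intro w hw1 hwN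
      rw [hinv w hw1 hwN]
      have hpart0 : (l0 ++ [e]).filterMap (fun e' =>
            if e'.1 = u ∧ e'.2.1 = w then some (du + e'.2.2) else none)
          = l0.filterMap (fun e' => if e'.1 = u ∧ e'.2.1 = w then some (du + e'.2.2) else none) := by
        rw [List.filterMap_append]
        simp [he1]
      rw [hpart0]

-- one outer iteration of B's loop preserves JB
lemma B_outer_step {N : Int} {E : List (Int × Int × Int)} (hE : HE N E)
    (u : Int) (hu : 1 ≤ u) (huN : u ≤ N) (dist : PySem.Dict Int Int) (hJ : JB E N u dist) :
    JB E N (u+1) (if PySem.Dict.contains dist u = false then dist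
      else E.foldl (stepB u) dist) := by
  have hvu := hJ u (by omega) (by omega)
  rw [if_pos (le_refl u)] at hvu
  rcases hdu : delta E u with _ | du
  · have hnone : PySem.Dict.contains dist u = false := by
      rw [PySem.Dict.contains_eq_isSome_get?, hvu, hdu]
      rfl
    rw [if_pos hnone]
    intro w hw1 hwN
    have hperm := cand_succ_perm hE u w hu
    have hgnil : E.filterMap (fun e => if e.1 = u ∧ e.2.1 = w then
        (delta E u).map (fun d => d + e.2.2) else none) = [] := by
      refine List.filterMap_eq_nil_iff.mpr (fun e he => ?_)
      by_cases hc : e.1 = u ∧ e.2.1 = w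
      · rw [if_pos hc, hdu]; rfl
      · rw [if_neg hc]
    rw [hgnil, List.append_nil] at hperm
    rw [hJ w hw1 hwN]
    by_cases hwu : w ≤ u
    · rw [if_pos hwu, if_pos (by omega)]
    · rw [if_neg hwu]
      by_cases hwu1 : w ≤ u + 1
      · have hw1' : w = u + 1 := by omega
        rw [if_pos hwu1, hw1']
        rw [delta_unfold E (u+1) (by omega)]
        rw [hw1'] at hperm
        exact (ominList_perm _ _ hperm none).symm
      · rw [if_neg hwu1]
        exact (ominList_perm _ _ hperm none).symm
  · have hsome : PySem.Dict.contains dist u = false → False := by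
      intro hc
      rw [PySem.Dict.contains_eq_isSome_get?, hvu, hdu] at hc
      cases hc
    rw [if_neg (fun hc => absurd hc hsome)]
    have hfin := B_inner hE u du hu huN hdu E [] (by simp) dist (by
      intro w hw1 hwN
      rw [hJ w hw1 hwN]
      by_cases hwu : w ≤ u
      · rw [if_pos hwu, if_pos hwu]
      · rw [if_neg hwu, if_neg hwu, List.filterMap_nil, List.append_nil])
    intro w hw1 hwN
    have hgp : E.filterMap (fun e => if e.1 = u ∧ e.2.1 = w then
          (delta E u).map (fun d => d + e.2.2) else none)
        = E.filterMap (fun e => if e.1 = u ∧ e.2.1 = w then some (du + e.2.2) else none) := by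
      refine List.filterMap_congr (fun e he => ?_)
      by_cases hc : e.1 = u ∧ e.2.1 = w
      · rw [if_pos hc, if_pos hc, hdu]; rfl
      · rw [if_neg hc, if_neg hc]
    have hperm := cand_succ_perm hE u w hu
    rw [hgp] at hperm
    rw [hfin w hw1 hwN]
    by_cases hwu : w ≤ u
    · rw [if_pos hwu, if_pos (by omega)]
    · rw [if_neg hwu]
      by_cases hwu1 : w ≤ u + 1
      · have hw1' : w = u + 1 := by omega
        rw [if_pos hwu1, hw1']
        rw [delta_unfold E (u+1) (by omega)]
        rw [hw1'] at hperm
        exact (ominList_perm _ _ hperm none).symm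
      · rw [if_neg hwu1]
        exact (ominList_perm _ _ hperm none).symm

lemma B_final {N : Int} {E : List (Int × Int × Int)} (hE : HE N E) (hN : 1 ≤ N) :
    JB E N (N+1)
      ((PySem.List.pyRange 1 (N+1) 1).foldl (fun dist u =>
        if PySem.Dict.contains dist u = false then dist
        else E.foldl (stepB u) dist)
        (PySem.Dict.insert PySem.Dict.empty 1 0)) := by
  have hbase : JB E N 1 (PySem.Dict.insert PySem.Dict.empty 1 0) := by
    intro w hw1 hwN
    by_cases hw : w = (1 : Int)
    · subst hw
      rw [PySem.Dict.get?_insert_self, if_pos (le_refl 1), delta_one]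
    · rw [PySem.Dict.get?_insert_of_ne _ _ hw, PySem.Dict.get?_empty]
      rw [if_neg (by omega), cand_one]
      rfl
  have main : ∀ u : Int, 1 ≤ u → u ≤ N + 1 →
      JB E N u ((PySem.List.pyRange 1 u 1).foldl (fun dist u =>
        if PySem.Dict.contains dist u = false then dist
        else E.foldl (stepB u) dist)
        (PySem.Dict.insert PySem.Dict.empty 1 0)) := by
    intro u hu
    induction u, hu using Int.le_induction with
    | base =>
      intro _
      rw [PySem.List.pyRange_one_eq_nil (le_refl 1)]
      exact hbase
    | succ n hn ih =>
      intro hn1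
      rw [PySem.List.pyRange_one_succ_right hn, List.foldl_append, List.foldl_cons,
        List.foldl_nil]
      exact B_outer_step hE n hn (by omega) _ (ih (by omega))
  exact main (N+1) (by omega) (le_refl _)

-- ===== the inert branch: node 1 has no outgoing normalized edge =====

lemma pvIdx_cons01 (a b : Int) (l : List Int) :
    pvIdx (a :: b :: l) 0 = a ∧ pvIdx (a :: b :: l) 1 = b := by
  constructor
  · rw [pvIdx, PySem.List.pyGet?_zero_cons]; rfl
  · rw [pvIdx, show (1:Int) = ((1:Nat):Int) by rfl, PySem.List.pyGet?_natCast]; rfl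

-- the normalized source of a row is the smaller endpoint
lemma normRow_source (r : List Int) (h : 2 ≤ r.length) :
    pvIdx (normRow r) 0 = (if pvIdx r 0 > pvIdx r 1 then pvIdx r 1 else pvIdx r 0) := by
  rcases r with _ | ⟨a, _ | ⟨b, rest⟩⟩ <;> simp at h
  obtain ⟨h0, h1⟩ := pvIdx_cons01 a b rest
  rw [h0, h1]
  by_cases hab : a > b
  · rw [normRow, if_pos hab, if_pos hab, (pvIdx_cons01 b a rest).1]
  · rw [normRow, if_neg hab, if_neg hab, (pvIdx_cons01 a b rest).1]

lemma A_inert (road : List (List Int))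
    (h : ∀ r ∈ road, 2 ≤ r.length ∧ (if pvIdx r 0 > pvIdx r 1 then pvIdx r 1 else pvIdx r 0) ≠ 1) :
    ∀ (fuel : Nat) (t : List Int), dfsA (road.map normRow) fuel 1 t = t := by
  intro fuel t
  cases fuel with
  | zero => rfl
  | succ fuel =>
    have hfold : (road.map normRow).foldl (stepRow 1) (([] : List Int), t) = ([], t) := by
      rw [List.foldl_map]
      rw [PySem.List.foldl_congr_mem road _ (fun acc _ => acc) _ (fun acc r hr => ?_)]
      · rw [PySem.List.foldl_ignore]
      · obtain ⟨hl2, hmin⟩ := h r hr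
        rw [stepRow, if_neg]
        rw [normRow_source r hl2]
        exact hmin
    show (let p := (road.map normRow).foldl (stepRow 1) ([], t)
          p.1.foldl (fun time t => dfsA (road.map normRow) fuel t time) p.2) = t
    rw [hfold]
    rfl

lemma B_inert (road : List (List Int))
    (h : ∀ r ∈ road, 2 ≤ r.length ∧ (if pvIdx r 0 > pvIdx r 1 then pvIdx r 1 else pvIdx r 0) ≠ 1) :
    ∀ us : List Int, us.foldl (fun dist u =>
      if PySem.Dict.contains dist u = false then dist
      else road.foldl (fun dist r =>
        let ab := if pvIdx r 0 ≤ pvIdx r 1 then (pvIdx r 0, pvIdx r 1)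
                  else (pvIdx r 1, pvIdx r 0)
        if ab.1 = u then
          let nd := (PySem.Dict.get? dist u).getD 0 + pvIdx r 2
          match PySem.Dict.get? dist ab.2 with
          | none => PySem.Dict.insert dist ab.2 nd
          | some db => if nd < db then PySem.Dict.insert dist ab.2 nd else dist
        else dist) dist) (PySem.Dict.insert PySem.Dict.empty 1 0)
      = PySem.Dict.insert PySem.Dict.empty 1 0 := by
  intro us
  induction us with
  | nil => rfl
  | cons u us ih =>
    rw [List.foldl_cons]
    by_cases hu1 : u = (1 : Int)
    · subst hu1
      rw [if_neg (by
        rw [PySem.Dict.contains_eq_isSome_get?, PySem.Dict.get?_insert_self]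
        simp)]
      rw [PySem.List.foldl_congr_mem road _ (fun acc _ => acc) _ (fun acc r hr => ?_),
        PySem.List.foldl_ignore]
      · exact ih
      · obtain ⟨hl2, hmin⟩ := h r hr
        have hmin' : (if pvIdx r 0 ≤ pvIdx r 1 then (pvIdx r 0, pvIdx r 1)
            else (pvIdx r 1, pvIdx r 0)).1 ≠ 1 := by
          by_cases hab : pvIdx r 0 ≤ pvIdx r 1
          · rw [if_pos hab]
            rw [if_neg (by omega)] at hmin
            exact hmin
          · rw [if_neg hab]
            rw [if_pos (by omega)] at hmin
            exact hmin
        simp only [if_neg hmin']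
    · rw [if_pos (by
        rw [PySem.Dict.contains_eq_isSome_get?,
          PySem.Dict.get?_insert_of_ne _ _ hu1, PySem.Dict.get?_empty]
        rfl)]
      exact ih

-- ===== put together =====
lemma HE_of_rows {N : Int} {road : List (List Int)}
    (hrows : ∀ r ∈ road, 3 ≤ r.length ∧
      1 ≤ pvIdx r 0 ∧ pvIdx r 0 ≤ N ∧ 1 ≤ pvIdx r 1 ∧ pvIdx r 1 ≤ N ∧
      pvIdx r 0 ≠ pvIdx r 1 ∧ 1 ≤ pvIdx r 2) :
    HE N (road.map edgeOf) := by
  intro e he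
  obtain ⟨r, hr, rfl⟩ := List.mem_map.mp he
  obtain ⟨hl3, h01, h02, h11, h12, hne, h2⟩ := hrows r hr
  by_cases hab : pvIdx r 0 ≤ pvIdx r 1
  · simp only [edgeOf, if_pos hab]
    refine ⟨?_, ?_, ?_, ?_⟩ <;> dsimp only <;> omega
  · simp only [edgeOf, if_neg hab]
    refine ⟨?_, ?_, ?_, ?_⟩ <;> dsimp only <;> omega

lemma main_eq (N : Int) (road : List (List Int)) (K : Int) (h : Pre_solution N road K) :
    solution N road K = solution_alt N road K := by
  rcases h with ⟨hN, hrows⟩ | hinert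
  · -- the well-formed branch
    have hlen3 : ∀ r ∈ road, 3 ≤ r.length := fun r hr => (hrows r hr).1
    have hE : HE N (road.map edgeOf) := HE_of_rows hrows
    have hnn0 : NonnegT (List.replicate (N+1).toNat (0:Int)) := by
      intro i hi; rw [pvIdx_replicate]
    have hA0 : solution N road K
        = (PySem.List.pyRange 1 (PySem.List.len (dfsSem (road.map edgeOf) (N.toNat + 2) 1
            (List.replicate (N+1).toNat 0))) 1).foldl
          (fun a i => if pvIdx (dfsSem (road.map edgeOf) (N.toNat + 2) 1
            (List.replicate (N+1).toNat 0)) i ≤ K then a + 1 else a) 0 := by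
      show (PySem.List.pyRange 1 (PySem.List.len (dfsA (road.map (fun r => match r with
          | a :: b :: rest => if a > b then b :: a :: rest else a :: b :: rest
          | r => r)) (N.toNat + 2) 1 (List.replicate (N+1).toNat 0))) 1).foldl
          (fun a i => if pvIdx (dfsA (road.map (fun r => match r with
          | a :: b :: rest => if a > b then b :: a :: rest else a :: b :: rest
          | r => r)) (N.toNat + 2) 1 (List.replicate (N+1).toNat 0)) i ≤ K then a + 1 else a) 0 = _
      rw [dfsA_eq_dfsSem road hlen3]
    have hFlen : (dfsSem (road.map edgeOf) (N.toNat + 2) 1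
        (List.replicate (N+1).toNat 0)).length = (N+1).toNat := by
      rw [(dfs_sle hE (N.toNat + 2) 1 _ (by omega) hnn0).2.1, List.length_replicate]
    have hlenInt : PySem.List.len (dfsSem (road.map edgeOf) (N.toNat + 2) 1
        (List.replicate (N+1).toNat 0)) = N + 1 := by
      rw [PySem.List.len_eq, hFlen]; omega
    rw [hlenInt] at hA0
    have hbody : ∀ (dist : PySem.Dict Int Int) (u : Int),
        (if PySem.Dict.contains dist u = false then dist
         else road.foldl (fun dist r =>
           let ab := if pvIdx r 0 ≤ pvIdx r 1 then (pvIdx r 0, pvIdx r 1)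
                     else (pvIdx r 1, pvIdx r 0)
           if ab.1 = u then
             let nd := (PySem.Dict.get? dist u).getD 0 + pvIdx r 2
             match PySem.Dict.get? dist ab.2 with
             | none => PySem.Dict.insert dist ab.2 nd
             | some db => if nd < db then PySem.Dict.insert dist ab.2 nd else dist
           else dist) dist)
        = (if PySem.Dict.contains dist u = false then dist
           else (road.map edgeOf).foldl (stepB u) dist) := by
      intro dist u
      by_cases hc : PySem.Dict.contains dist u = false
      · rw [if_pos hc, if_pos hc]
      · rw [if_neg hc, if_neg hc, List.foldl_map]
        exact PySem.List.foldl_congr_mem _ _ _ _ (fun acc r _ => rowB_eq u acc r)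
    have hB0 : solution_alt N road K
        = (PySem.List.pyRange 1 (N+1) 1).foldl
          (fun acc i => if (PySem.Dict.get? ((PySem.List.pyRange 1 (N+1) 1).foldl
            (fun dist u => if PySem.Dict.contains dist u = false then dist
              else (road.map edgeOf).foldl (stepB u) dist)
            (PySem.Dict.insert PySem.Dict.empty 1 0)) i).getD 0 ≤ K
            then acc + 1 else acc) 0 := by
      show (PySem.List.pyRange 1 (N+1) 1).foldl
          (fun acc i => if (PySem.Dict.get? ((PySem.List.pyRange 1 (N+1) 1).foldl
            (fun dist u => if PySem.Dict.contains dist u = false then dist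
              else road.foldl (fun dist r =>
                let ab := if pvIdx r 0 ≤ pvIdx r 1 then (pvIdx r 0, pvIdx r 1)
                          else (pvIdx r 1, pvIdx r 0)
                if ab.1 = u then
                  let nd := (PySem.Dict.get? dist u).getD 0 + pvIdx r 2
                  match PySem.Dict.get? dist ab.2 with
                  | none => PySem.Dict.insert dist ab.2 nd
                  | some db => if nd < db then PySem.Dict.insert dist ab.2 nd else dist
                else dist) dist)
            (PySem.Dict.insert PySem.Dict.empty 1 0)) i).getD 0 ≤ K
            then acc + 1 else acc) 0 = _
      have hout : ((PySem.List.pyRange 1 (N+1) 1).foldl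
            (fun dist u => if PySem.Dict.contains dist u = false then dist
              else road.foldl (fun dist r =>
                let ab := if pvIdx r 0 ≤ pvIdx r 1 then (pvIdx r 0, pvIdx r 1)
                          else (pvIdx r 1, pvIdx r 0)
                if ab.1 = u then
                  let nd := (PySem.Dict.get? dist u).getD 0 + pvIdx r 2
                  match PySem.Dict.get? dist ab.2 with
                  | none => PySem.Dict.insert dist ab.2 nd
                  | some db => if nd < db then PySem.Dict.insert dist ab.2 nd else dist
                else dist) dist)
            (PySem.Dict.insert PySem.Dict.empty 1 0))
          = ((PySem.List.pyRange 1 (N+1) 1).foldl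
            (fun dist u => if PySem.Dict.contains dist u = false then dist
              else (road.map edgeOf).foldl (stepB u) dist)
            (PySem.Dict.insert PySem.Dict.empty 1 0)) :=
        PySem.List.foldl_congr_mem _ _ _ _ (fun acc u _ => hbody acc u)
      rw [hout]
    have hJ := B_final hE hN
    rw [hA0, hB0]
    refine PySem.List.foldl_congr_mem _ _ _ _ (fun acc i hi => ?_)
    obtain ⟨hi1, hi2⟩ := (PySem.List.mem_pyRange_one).mp hi
    have hAv := A_final hE hN i hi1 (by omega)
    have hBv := hJ i hi1 (by omega)
    rw [if_pos (by omega : i ≤ N + 1)] at hBv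
    rw [hAv, hBv]
  · -- the inert branch: nothing is reachable from node 1
    have hA0 : solution N road K
        = (PySem.List.pyRange 1 (PySem.List.len (List.replicate (N+1).toNat (0:Int))) 1).foldl
          (fun a i => if pvIdx (List.replicate (N+1).toNat (0:Int)) i ≤ K then a + 1 else a) 0 := by
      show (PySem.List.pyRange 1 (PySem.List.len (dfsA (road.map (fun r => match r with
          | a :: b :: rest => if a > b then b :: a :: rest else a :: b :: rest
          | r => r)) (N.toNat + 2) 1 (List.replicate (N+1).toNat 0))) 1).foldl
          (fun a i => if pvIdx (dfsA (road.map (fun r => match r with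
          | a :: b :: rest => if a > b then b :: a :: rest else a :: b :: rest
          | r => r)) (N.toNat + 2) 1 (List.replicate (N+1).toNat 0)) i ≤ K then a + 1 else a) 0 = _
      have hm : road.map (fun r => match r with
          | a :: b :: rest => if a > b then b :: a :: rest else a :: b :: rest
          | r => r) = road.map normRow := rfl
      rw [hm, A_inert road hinert]
    have hB0 : solution_alt N road K
        = (PySem.List.pyRange 1 (N+1) 1).foldl
          (fun acc i => if (PySem.Dict.get? (PySem.Dict.insert PySem.Dict.empty 1 0) i).getD 0 ≤ K
            then acc + 1 else acc) 0 := by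
      show (PySem.List.pyRange 1 (N+1) 1).foldl
          (fun acc i => if (PySem.Dict.get? ((PySem.List.pyRange 1 (N+1) 1).foldl
            (fun dist u => if PySem.Dict.contains dist u = false then dist
              else road.foldl (fun dist r =>
                let ab := if pvIdx r 0 ≤ pvIdx r 1 then (pvIdx r 0, pvIdx r 1)
                          else (pvIdx r 1, pvIdx r 0)
                if ab.1 = u then
                  let nd := (PySem.Dict.get? dist u).getD 0 + pvIdx r 2
                  match PySem.Dict.get? dist ab.2 with
                  | none => PySem.Dict.insert dist ab.2 nd
                  | some db => if nd < db then PySem.Dict.insert dist ab.2 nd else dist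
                else dist) dist)
            (PySem.Dict.insert PySem.Dict.empty 1 0)) i).getD 0 ≤ K
            then acc + 1 else acc) 0 = _
      rw [B_inert road hinert]
    rw [hA0, hB0]
    have hBe : ∀ i : Int,
        (PySem.Dict.get? (PySem.Dict.insert PySem.Dict.empty 1 0) i).getD (0:Int) = 0 := by
      intro i
      by_cases hi : i = (1 : Int)
      · subst hi; rw [PySem.Dict.get?_insert_self]; rfl
      · rw [PySem.Dict.get?_insert_of_ne _ _ hi, PySem.Dict.get?_empty]; rfl
    by_cases hN0 : 0 ≤ N
    · have hlen : PySem.List.len (List.replicate (N+1).toNat (0:Int)) = N + 1 := by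
        rw [PySem.List.len_eq, List.length_replicate]; omega
      rw [hlen]
      refine PySem.List.foldl_congr_mem _ _ _ _ (fun acc i _ => ?_)
      rw [pvIdx_replicate, hBe i]
    · have hlen : PySem.List.len (List.replicate (N+1).toNat (0:Int)) = 0 := by
        rw [PySem.List.len_eq, List.length_replicate]; omega
      rw [hlen, PySem.List.pyRange_one_eq_nil (by omega : (0:Int) ≤ 1),
        PySem.List.pyRange_one_eq_nil (by omega : N + 1 ≤ 1)]
      rfl

-- ===== VERDICT (by name: the statement is the Claim_ definition above) =====
theorem solution_spec : Claim_equal_solution := by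
  intro N road K _ hPre
  unfold Spec_solution
  exact main_eq N road K hPre
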